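-- pv_equiv track=rewrite | github.com/VigHub/advent-of-code | 2023/12/1.py | next_combination
-- ===== SOURCE A (Python) =====
-- def next_combination(chars):
--     for i in range(len(chars)-1, -1, -1):
--         if chars[i] == '#':
--             chars[i] = '.'
--         else:
--             chars[i] = '#'
--             break
--     return chars
-- ===== SOURCE B (Python) =====
-- def next_combination(chars):
--     # forward scan to find the rightmost non-'#' position, then fill the suffix
--     pivot = -1
--     for j, c in enumerate(chars):
--         if c != '#':
--             pivot = j
--     if pivot == -1:
--         chars[:] = ['.'] * len(chars)
--     else:
--         chars[pivot] = '#'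
--         chars[pivot + 1:] = ['.'] * (len(chars) - pivot - 1)
--     return chars
-- ===== Notes on version B (the rewrite author's own statement) =====
-- stated objective: alternative
-- what changed: Replaces the backward flip-until-break scan with a forward pass that records the rightmost non-'#' pivot, then rebuilds the suffix (pivot set to '#', everything after it to '.') in one bulk assignment.
import Mathlib
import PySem

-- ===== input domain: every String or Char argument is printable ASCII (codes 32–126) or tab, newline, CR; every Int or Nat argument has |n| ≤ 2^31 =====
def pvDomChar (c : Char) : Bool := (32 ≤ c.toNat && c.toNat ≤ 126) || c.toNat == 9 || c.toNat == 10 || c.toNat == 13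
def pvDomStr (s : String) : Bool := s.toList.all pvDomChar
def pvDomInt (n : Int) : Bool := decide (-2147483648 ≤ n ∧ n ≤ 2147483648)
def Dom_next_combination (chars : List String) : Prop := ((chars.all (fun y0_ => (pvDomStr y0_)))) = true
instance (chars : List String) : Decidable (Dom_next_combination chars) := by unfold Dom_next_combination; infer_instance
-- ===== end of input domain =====

-- B replaces A's backward flip-until-break scan by a forward pivot search plus a bulk suffix rebuild (alternative decomposition, same cost).


-- ===== PORT A =====
-- A's loop `for i in range(len(chars)-1, -1, -1)` with break: indices len-1 … 0.
def nextLoopA (chars : List String) : List Nat → List String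
  | [] => chars
  | i :: rest =>
    if chars.getD i "" == "#" then nextLoopA (chars.set i ".") rest
    else chars.set i "#"

def next_combination (chars : List String) : List String :=
  nextLoopA chars (List.range chars.length).reverse

-- ===== PORT B =====
-- forward scan recording the rightmost non-'#' index (B's enumerate loop)
def pivotB (chars : List String) : Option Nat :=
  chars.zipIdx.foldl (fun acc p => if p.1 ≠ "#" then some p.2 else acc) none

def next_combination_alt (chars : List String) : List String :=
  match pivotB chars with
  | none => List.replicate chars.length "."
  | some i => chars.take i ++ ["#"] ++ List.replicate (chars.length - i - 1) "."

-- ===== PRECONDITION & SPEC =====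
def Spec_next_combination (chars : List String) (out : List String) : Prop := out = next_combination_alt chars
instance (chars : List String) (out : List String) : Decidable (Spec_next_combination chars out) := by unfold Spec_next_combination; infer_instance

-- ===== CLAIM (what is proved, stated in full; the proofs are below) =====
def Claim_equal_next_combination : Prop := ∀ (chars : List String), Dom_next_combination chars → Spec_next_combination chars (next_combination chars)

-- ===== LEMMAS AND PROOFS =====

theorem nextLoopA_append (idxs : List Nat) (chars : List String) (y : String)
    (h : ∀ i ∈ idxs, i < chars.length) :
    nextLoopA (chars ++ [y]) idxs = nextLoopA chars idxs ++ [y] := by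
  induction idxs generalizing chars with
  | nil => simp [nextLoopA]
  | cons i rest ih =>
    have hi : i < chars.length := h i (by simp)
    have hget : (chars ++ [y])[i]?.getD "" = chars[i]?.getD "" := by
      simp [List.getElem?_append_left hi]
    have hset : ∀ z, (chars ++ [y]).set i z = chars.set i z ++ [y] := by
      intro z; rw [List.set_append]; simp [hi]
    by_cases hc : chars[i]?.getD "" = "#"
    · simp only [nextLoopA, List.getD, hget, hc, hset, beq_self_eq_true, if_true]
      exact ih (chars.set i ".") (fun j hj => by
        simpa using h j (List.mem_cons_of_mem _ hj))
    · simp [nextLoopA, List.getD, hget, hc, hset]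

theorem nextA_snoc (xs : List String) (x : String) :
    next_combination (xs ++ [x]) =
      if x == "#" then next_combination xs ++ ["."] else xs ++ ["#"] := by
  have hlen : (xs ++ [x]).length = xs.length + 1 := by simp
  have hrange : (List.range (xs.length + 1)).reverse = xs.length :: (List.range xs.length).reverse := by
    simp [List.range_succ]
  unfold next_combination
  rw [hlen, hrange]
  by_cases hc : x = "#"
  · subst hc
    have h1 : ((xs ++ ["#"])[xs.length]?.getD "") = "#" := by simp
    have h2 : (xs ++ ["#"]).set xs.length "." = xs ++ ["."] := by rw [List.set_append]; simp
    simp only [nextLoopA, List.getD, h1, h2, beq_self_eq_true, if_true]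
    exact nextLoopA_append _ xs "." (fun i hi => by simpa using hi)
  · have hset : (xs ++ [x]).set xs.length "#" = xs ++ ["#"] := by rw [List.set_append]; simp
    simp [nextLoopA, List.getD, hc, hset]

theorem pivotB_snoc (xs : List String) (x : String) :
    pivotB (xs ++ [x]) = if x ≠ "#" then some xs.length else pivotB xs := by
  unfold pivotB
  rw [List.zipIdx_append, List.foldl_append]
  simp [List.zipIdx]

theorem pivotB_lt (xs : List String) (i : Nat) (h : pivotB xs = some i) : i < xs.length := by
  induction xs using List.reverseRecOn with
  | nil => simp [pivotB] at h
  | append_singleton ys y ih =>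
    rw [pivotB_snoc] at h
    by_cases hy : y ≠ "#"
    · rw [if_pos hy] at h; simp_all
    · rw [if_neg hy] at h
      have := ih h
      simp; omega

theorem nextB_snoc (xs : List String) (x : String) :
    next_combination_alt (xs ++ [x]) =
      if x == "#" then next_combination_alt xs ++ ["."] else xs ++ ["#"] := by
  unfold next_combination_alt
  rw [pivotB_snoc]
  by_cases hc : x == "#"
  · have hx : ¬ x ≠ "#" := by simpa using hc
    rw [if_neg hx, if_pos hc]
    cases hp : pivotB xs with
    | none =>
      simp [List.replicate_succ' ]
    | some i =>
      have hi := pivotB_lt xs i hp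
      have htake : (xs ++ [x]).take i = xs.take i := List.take_append_of_le_length (by omega)
      have hrep : List.replicate (xs.length + 1 - i - 1) "." =
          List.replicate (xs.length - i - 1) "." ++ ["."] := by
        have : xs.length + 1 - i - 1 = (xs.length - i - 1) + 1 := by omega
        rw [this, List.replicate_succ']
      simp [htake, hrep]
  · have hx : x ≠ "#" := by simpa using hc
    rw [if_pos hx, if_neg hc]
    have htake : (xs ++ [x]).take xs.length = xs := by simp
    simp [htake]

-- ===== VERDICT (by name: the statement is the Claim_ definition above) =====
theorem next_eq_alt (chars : List String) : next_combination chars = next_combination_alt chars := by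
  induction chars using List.reverseRecOn with
  | nil => rfl
  | append_singleton ys y ih =>
    rw [nextA_snoc, nextB_snoc, ih]

theorem next_combination_spec : Claim_equal_next_combination := by
  intro chars _
  exact next_eq_alt chars
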